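-- pv_equiv track=rewrite | github.com/HeewonKwak/algo_test | programmers/탐색/이진 변환 반복하기.py | solution
-- ===== SOURCE A (Python) =====
-- from collections import Counter
--
-- def solution(s):
--     answer = []
--     zero = 0
--     cnt = 0
--     while(1):
--         cc = Counter(s)
--         if s == "1":
--             break
--         zero += cc['0']
--         s = two(cc['1'])
--         cnt += 1
--     return [cnt, zero]
--
-- def two(n):
--     num = ""
--     while(1):
--         n, a = n // 2, n % 2
--         num += str(a)
--         if n == 0:
--             break
--     return num[::-1]
-- ===== SOURCE B (Python) =====
-- def solution(s):
--     if s == "1":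
--         return [0, 0]
--
--     def chain(n):
--         return [n] if n == 1 else [n] + chain(bin(n).count('1'))
--
--     c = chain(s.count('1'))
--     zeros = s.count('0') + sum(v.bit_length() - bin(v).count('1') for v in c[:-1])
--     return [len(c), zeros]
-- ===== Notes on version B (the rewrite author's own statement) =====
-- stated objective: alternative
-- what changed: A runs one imperative while-loop that each round recounts the string with a Counter and rebuilds a binary string by hand-rolled div/mod; B counts the original string once, recursively materialises the whole chain of popcount values as a list, and then computes the answer in two aggregation passes over that list (its length for the step count, a sum of bit_length-popcount for the removed zeros).
import Mathlib
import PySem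

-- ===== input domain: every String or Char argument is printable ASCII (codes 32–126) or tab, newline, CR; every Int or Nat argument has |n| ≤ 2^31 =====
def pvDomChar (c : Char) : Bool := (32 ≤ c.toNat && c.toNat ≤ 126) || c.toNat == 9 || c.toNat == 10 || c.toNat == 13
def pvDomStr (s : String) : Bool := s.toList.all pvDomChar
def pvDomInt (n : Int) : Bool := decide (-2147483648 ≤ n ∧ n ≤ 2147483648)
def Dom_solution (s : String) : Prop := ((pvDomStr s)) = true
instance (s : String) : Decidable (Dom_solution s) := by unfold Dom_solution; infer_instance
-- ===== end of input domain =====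

-- B replaces A's per-round Counter-and-rebuilt-binary-string accumulator loop by recursively
-- materialising the chain of popcount values as a list and aggregating over it in two passes.
-- The Nat fuel parameters below are totality guards only: each is proved sufficient wherever
-- the Python code terminates (everywhere inside Pre_solution).

-- ===== PORT A =====
-- inner while-loop of `two` (builds the binary digits LSB-first, then `two` reverses);
-- fuel n.toNat + 1 always exceeds the iteration count (which is the bit length of n)
def twoLoop : Nat → Int → List Char → List Char
  | 0, _, num => num
  | fuel + 1, n, num =>
    let n' := PySem.Int.floordiv n 2
    let a := PySem.Int.mod n 2
    let num' := num ++ (PySem.Int.toStr a).toList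
    if n' = 0 then num' else twoLoop fuel n' num'

def two (n : Int) : List Char := (twoLoop (n.toNat + 1) n []).reverse

-- the while(1) loop of A's `solution`; the chain of '1'-counts strictly decreases,
-- so count + 2 units of fuel always suffice where the Python loop terminates
def loopA : Nat → List Char → Int → Int → Int × Int
  | 0, _, cnt, zero => (cnt, zero)
  | fuel + 1, s, cnt, zero =>
    if s = ['1'] then (cnt, zero)
    else
      let k := s.count '1'
      if k = 0 then (cnt, zero)   -- Python A never leaves the loop here (diverges); excluded by Pre_solution
      else loopA fuel (two (k : Int)) (cnt + 1) (zero + (s.count '0' : Int))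

def solution (s : String) : List Int :=
  let p := loopA (s.toList.count '1' + 2) s.toList 0 0
  [p.1, p.2]

-- ===== PORT B =====
-- Source B's recursive `chain`: [n] if n == 1 else [n] + chain(bin(n).count('1'));
-- the chain from m has at most m elements, so fuel m + 1 suffices (proved below)
def chainB : Nat → Int → List Int
  | 0, _ => []
  | fuel + 1, n =>
    if n = 1 then [n] else n :: chainB fuel ((PySem.Int.bitCount n : Int))

def solution_alt (s : String) : List Int :=
  if s = "1" then [0, 0]
  else
    let l := s.toList
    let c := chainB (l.count '1' + 1) (l.count '1' : Int)
    let zeros : Int := (l.count '0' : Int) +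
      (c.dropLast.map (fun v => ((PySem.Int.bitLength v : Int) - (PySem.Int.bitCount v : Int)))).sum
    [(c.length : Int), zeros]

-- ===== PRECONDITION & SPEC =====
-- Pre_ excludes strings that contain no ones digit, on which Python A loops forever
-- (and B's recursion never terminates either).
def Pre_solution (s : String) : Prop := '1' ∈ s.toList
instance (s : String) : Decidable (Pre_solution s) := by unfold Pre_solution; infer_instance
def pvWitness_solution : String := "110010"

def Spec_solution (s : String) (out : List Int) : Prop := out = solution_alt s
instance (s : String) (out : List Int) : Decidable (Spec_solution s out) := by unfold Spec_solution; infer_instance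

-- ===== CLAIM (what is proved, stated in full; the proofs are below) =====
def Claim_equal_solution : Prop := ∀ (s : String), Dom_solution s → Pre_solution s → Spec_solution s (solution s)

-- ===== LEMMAS AND PROOFS =====

theorem pv_bitCount_le (m : Nat) : PySem.Int.bitCount (m : Int) ≤ m := by
  induction m using Nat.strong_induction_on with
  | _ m ih =>
    rcases Nat.eq_zero_or_pos m with h | h
    · subst h; simp
    · rw [PySem.Int.bitCount_natCast h]
      have := ih (m / 2) (Nat.div_lt_self h (by norm_num))
      omega

theorem pv_bitCount_lt (m : Nat) (h : 2 ≤ m) : PySem.Int.bitCount (m : Int) < m := by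
  rw [PySem.Int.bitCount_natCast (show 0 < m by omega)]
  have := pv_bitCount_le (m / 2)
  omega

theorem pv_bitCount_pos (m : Nat) (h : 1 ≤ m) : 1 ≤ PySem.Int.bitCount (m : Int) := by
  induction m using Nat.strong_induction_on with
  | _ m ih =>
    rw [PySem.Int.bitCount_natCast (show 0 < m by omega)]
    rcases Nat.eq_zero_or_pos (m / 2) with h2 | h2
    · have : m = 1 := by omega
      subst this; simp
    · have := ih (m / 2) (Nat.div_lt_self (by omega) (by norm_num)) h2
      omega

theorem pv_bitLength_two_le (m : Nat) (h : 2 ≤ m) : 2 ≤ PySem.Int.bitLength (m : Int) := by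
  rw [PySem.Int.bitLength_natCast (show 0 < m by omega)]
  have h2 : 1 ≤ m / 2 := by omega
  rw [PySem.Int.bitLength_natCast h2]
  omega

theorem twoLoop_spec (m : Nat) (h : 1 ≤ m) : ∀ fuel : Nat, m ≤ fuel → ∀ acc : List Char,
    (twoLoop fuel (m:Int) acc).count '1' = acc.count '1' + PySem.Int.bitCount (m:Int) ∧
    (twoLoop fuel (m:Int) acc).count '0' = acc.count '0' + (PySem.Int.bitLength (m:Int) - PySem.Int.bitCount (m:Int)) ∧
    (twoLoop fuel (m:Int) acc).length = acc.length + PySem.Int.bitLength (m:Int) := by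
  induction m using Nat.strong_induction_on with
  | _ m ih =>
    intro fuel hfuel acc
    obtain ⟨f, rfl⟩ : ∃ f, fuel = f + 1 := ⟨fuel - 1, by omega⟩
    rw [twoLoop]
    have hfd : PySem.Int.floordiv (m:Int) 2 = ((m/2 : Nat) : Int) := by
      exact_mod_cast PySem.Int.floordiv_natCast m 2
    have hmd : PySem.Int.mod (m:Int) 2 = ((m%2 : Nat) : Int) := by
      exact_mod_cast PySem.Int.mod_natCast m 2
    have hbc := PySem.Int.bitCount_natCast (show 0 < m by omega)
    have hbl := PySem.Int.bitLength_natCast (show 0 < m by omega)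
    have hle2 := PySem.Int.bitCount_le_bitLength ((m/2 : Nat) : Int)
    have hchars : (PySem.Int.toStr ((m%2 : Nat) : Int)).toList
        = [if m % 2 = 1 then '1' else '0'] := by
      rcases Nat.mod_two_eq_zero_or_one m with h2 | h2 <;> rw [h2] <;> decide
    simp only [hfd, hmd, hchars]
    have t1 : List.count '1' [if m % 2 = 1 then '1' else '0'] = m % 2 := by
      rcases Nat.mod_two_eq_zero_or_one m with h3 | h3 <;> simp [h3]
    have t0 : List.count '0' [if m % 2 = 1 then '1' else '0'] = 1 - m % 2 := by
      rcases Nat.mod_two_eq_zero_or_one m with h3 | h3 <;> simp [h3]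
    have tl : [if m % 2 = 1 then '1' else '0'].length = 1 := rfl
    rcases Nat.eq_zero_or_pos (m / 2) with h2 | h2
    · have hm1 : m = 1 := by omega
      subst hm1
      simp [List.count_append]
      decide
    · have hne : ¬ ((m/2 : Nat) : Int) = 0 := by exact_mod_cast Nat.pos_iff_ne_zero.mp h2
      rw [if_neg hne]
      obtain ⟨c1, c0, cl⟩ := ih (m / 2) (Nat.div_lt_self (by omega) (by norm_num)) h2
          f (by omega) (acc ++ [if m % 2 = 1 then '1' else '0'])
      refine ⟨?_, ?_, ?_⟩
      · rw [c1, hbc, List.count_append, t1]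
        omega
      · rw [c0, hbc, hbl, List.count_append, t0]
        omega
      · rw [cl, hbl, List.length_append, tl]
        omega

theorem two_count_one (m : Nat) (h : 1 ≤ m) :
    (two (m:Int)).count '1' = PySem.Int.bitCount (m:Int) := by
  simpa [two, List.count_reverse] using
    (twoLoop_spec m h ((m:Int).toNat + 1) (by simp) []).1

theorem two_count_zero (m : Nat) (h : 1 ≤ m) :
    (two (m:Int)).count '0' = PySem.Int.bitLength (m:Int) - PySem.Int.bitCount (m:Int) := by
  simpa [two, List.count_reverse] using
    (twoLoop_spec m h ((m:Int).toNat + 1) (by simp) []).2.1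

theorem two_length (m : Nat) (h : 1 ≤ m) :
    (two (m:Int)).length = PySem.Int.bitLength (m:Int) := by
  simpa [two] using (twoLoop_spec m h ((m:Int).toNat + 1) (by simp) []).2.2

theorem two_one : two (1:Int) = ['1'] := by decide

theorem two_ne_one (m : Nat) (h : 2 ≤ m) : two (m:Int) ≠ ['1'] := by
  intro hc
  have hl := two_length m (by omega)
  rw [hc] at hl
  have h2 := pv_bitLength_two_le m h
  simp at hl
  omega

theorem chainB_ne_nil (f : Nat) (n : Int) : chainB (f + 1) n ≠ [] := by
  rw [chainB]; split <;> simp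

-- A's while-loop started after its first round agrees with B's aggregations over the chain
theorem loop_eq_chain (m : Nat) (h : 1 ≤ m) :
    ∀ fa fb : Nat, m ≤ fa → m ≤ fb → ∀ cnt zero : Int,
      loopA fa (two (m:Int)) cnt zero =
        (cnt + ((chainB fb (m:Int)).length : Int) - 1,
         zero + ((chainB fb (m:Int)).dropLast.map
           (fun v => ((PySem.Int.bitLength v : Int) - (PySem.Int.bitCount v : Int)))).sum) := by
  induction m using Nat.strong_induction_on with
  | _ m ih =>
    intro fa fb hfa hfb cnt zero
    obtain ⟨a, rfl⟩ : ∃ a, fa = a + 1 := ⟨fa - 1, by omega⟩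
    obtain ⟨b, rfl⟩ : ∃ b, fb = b + 1 := ⟨fb - 1, by omega⟩
    rcases Nat.lt_or_ge m 2 with h2 | h2
    · have hm1 : m = 1 := by omega
      subst hm1
      rw [loopA, chainB]
      simp [show ((1:Nat):Int) = (1:Int) from rfl, two_one]
    · have hne := two_ne_one m h2
      have hbc1 := pv_bitCount_pos m (by omega)
      have hbclt := pv_bitCount_lt m h2
      set k : Nat := PySem.Int.bitCount ((m:Nat):Int) with hk
      obtain ⟨b', rfl⟩ : ∃ b', b = b' + 1 := ⟨b - 1, by omega⟩
      rw [loopA, if_neg hne]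
      simp only [two_count_one m (by omega), two_count_zero m (by omega), ← hk]
      rw [if_neg (by omega : ¬ k = 0)]
      rw [chainB, if_neg (by exact_mod_cast (by omega : m ≠ 1))]
      rw [ih k hbclt hbc1 a (b' + 1) (by omega) (by omega)]
      rw [List.dropLast_cons_of_ne_nil (chainB_ne_nil b' (k : Int))]
      simp only [List.map_cons, List.sum_cons, List.length_cons, ← hk]
      have hle := PySem.Int.bitCount_le_bitLength ((m:Nat):Int)
      rw [Prod.mk.injEq]
      refine ⟨by push_cast; ring, ?_⟩
      rw [Nat.cast_sub (by omega : k ≤ PySem.Int.bitLength ((m:Nat):Int))]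
      ring

theorem toList_eq_one_iff (s : String) : s.toList = ['1'] ↔ s = "1" := by
  constructor
  · intro h
    exact String.toList_inj.mp (by rw [h]; rfl)
  · intro h; subst h; rfl

-- ===== VERDICT (by name: the statement is the Claim_ definition above) =====
theorem solution_spec : Claim_equal_solution := by
  intro s _ hpre
  unfold Spec_solution solution solution_alt
  by_cases hs : s = "1"
  · subst hs
    rw [loopA]
    simp [show ("1":String).toList = ['1'] from rfl]
  · have hne : s.toList ≠ ['1'] := fun hc => hs ((toList_eq_one_iff s).mp hc)
    have hk : 1 ≤ s.toList.count '1' := List.count_pos_iff.mpr hpre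
    rw [if_neg hs, loopA, if_neg hne]
    rw [if_neg (by omega : ¬ s.toList.count '1' = 0)]
    rw [loop_eq_chain (s.toList.count '1') hk (s.toList.count '1' + 1) (s.toList.count '1' + 1)
        (by omega) (by omega)]
    norm_num
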